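-- pv_equiv track=rewrite | github.com/felixjusaydummy/bravetailor | app/__init__.py | display_get_imageresponsive
-- ===== SOURCE A (Python) =====
-- def display_get_imageresponsive(image_info):
--     # split images into iflag columns
--     imagelen = len(image_info)
--     row_responsive = "w3-third"
--     iflag = 3
--     if imagelen < 6:
--         row_responsive = "w3-half"
--         iflag = 2
--
--     tempf = []
--     image_categ = [ [] for x in range(iflag) ]
--     for i in range(imagelen):
--         tempf = image_categ[i % iflag]
--         tempf.append(image_info[i])
--
--     return image_categ, row_responsive
-- ===== SOURCE B (Python) =====
-- def display_get_imageresponsive(image_info):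
--     # Column j of the round-robin distribution is exactly the strided slice
--     # image_info[j::iflag], so build each column directly with one slice.
--     if len(image_info) < 6:
--         iflag, row_responsive = 2, "w3-half"
--     else:
--         iflag, row_responsive = 3, "w3-third"
--     image_categ = [list(image_info[j::iflag]) for j in range(iflag)]
--     return image_categ, row_responsive
-- ===== Notes on version B (the rewrite author's own statement) =====
-- stated objective: simpler
-- what changed: Replaces the index loop that round-robins each element into bucket i % iflag with direct construction of each column as the strided slice image_info[j::iflag].
import Mathlib
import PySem

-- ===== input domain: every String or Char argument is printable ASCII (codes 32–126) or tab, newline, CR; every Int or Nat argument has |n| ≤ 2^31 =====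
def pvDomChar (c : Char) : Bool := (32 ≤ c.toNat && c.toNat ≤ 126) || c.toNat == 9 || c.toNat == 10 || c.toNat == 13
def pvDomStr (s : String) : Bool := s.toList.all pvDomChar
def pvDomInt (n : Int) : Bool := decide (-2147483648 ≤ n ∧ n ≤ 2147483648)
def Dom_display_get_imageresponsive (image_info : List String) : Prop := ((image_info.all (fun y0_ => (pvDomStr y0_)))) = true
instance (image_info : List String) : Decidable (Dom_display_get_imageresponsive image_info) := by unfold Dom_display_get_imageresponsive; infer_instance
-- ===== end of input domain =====

-- B builds each column directly as the strided slice image_info[j::iflag] instead of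
-- A's round-robin dispatch loop (objective: simpler).

-- ===== PORT A =====
def display_get_imageresponsive (image_info : List String) : List (List String) × String :=
  let imagelen : Int := image_info.length
  let row_responsive : String := "w3-third"
  let iflag : Int := 3
  let (row_responsive, iflag) : String × Int :=
    if imagelen < 6 then ("w3-half", 2) else (row_responsive, iflag)
  let image_categ : List (List String) :=
    (PySem.List.pyRange 0 iflag 1).map (fun _ => ([] : List String))
  let image_categ : List (List String) :=
    (PySem.List.pyRange 0 imagelen 1).foldl
      (fun categ i =>
        -- tempf = image_categ[i % iflag]; tempf.append(image_info[i])
        PySem.List.pySetD categ (PySem.Int.mod i iflag)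
          (PySem.List.pyGetD categ (PySem.Int.mod i iflag) [] ++
            [PySem.List.pyGetD image_info i ""]))
      image_categ
  (image_categ, row_responsive)

-- ===== PORT B =====
def display_get_imageresponsive_alt (image_info : List String) : List (List String) × String :=
  let (iflag, row_responsive) : Int × String :=
    if (image_info.length : Int) < 6 then (2, "w3-half") else (3, "w3-third")
  -- image_categ = [list(image_info[j::iflag]) for j in range(iflag)]
  -- (the step iflag is a nonzero literal, so the slice never raises: .getD [] is exact)
  (((PySem.List.pyRange 0 iflag 1).map
      (fun j => (PySem.List.slice? image_info (some j) none iflag).getD [])),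
   row_responsive)

-- ===== PRECONDITION & SPEC =====
def Spec_display_get_imageresponsive (image_info : List String) (out : List (List String) × String) : Prop := out = display_get_imageresponsive_alt image_info
instance (image_info : List String) (out : List (List String) × String) : Decidable (Spec_display_get_imageresponsive image_info out) := by unfold Spec_display_get_imageresponsive; infer_instance

-- ===== CLAIM (what is proved, stated in full; the proofs are below) =====
def Claim_equal_display_get_imageresponsive : Prop := ∀ (image_info : List String), Dom_display_get_imageresponsive image_info → Spec_display_get_imageresponsive image_info (display_get_imageresponsive image_info)

-- ===== LEMMAS AND PROOFS =====

-- the j-th column after distributing the first n elements: indices j, j+k, j+2k, ... below n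
def pvCol (xs : List String) (k j n : Nat) : List String :=
  (List.range ((n - j + k - 1) / k)).map (fun m => xs.getD (j + k * m) "")

theorem pv_set_map_range {a : Type} (k j : Nat) (f : Nat -> a) (v : a) :
    ((List.range k).map f).set j v
      = (List.range k).map (fun i => if i = j then v else f i) := by
  apply List.ext_getElem (by simp)
  intro i h1 h2
  simp only [List.getElem_set, List.getElem_map, List.getElem_range]
  by_cases h : i = j
  · subst h; simp
  · simp [h, Ne.symm h]

-- A's loop over the first n indices produces the pvCol columns
theorem pv_loop_eq_cols (xs : List String) (k : Nat) (hk : k = 2 ∨ k = 3) (n : Nat) :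
    (PySem.List.pyRange 0 (n : Int) 1).foldl
      (fun categ i =>
        PySem.List.pySetD categ (PySem.Int.mod i (k : Int))
          (PySem.List.pyGetD categ (PySem.Int.mod i (k : Int)) [] ++
            [PySem.List.pyGetD xs i ""]))
      ((List.range k).map (fun _ => ([] : List String)))
      = (List.range k).map (fun j => pvCol xs k j n) := by
  induction n with
  | zero =>
      rw [show ((0 : Nat) : Int) = (0 : Int) by norm_num]
      rw [PySem.List.pyRange_one_eq_nil (le_refl 0)]
      rw [List.foldl_nil]
      apply List.map_congr_left
      intro j hj
      rw [List.mem_range] at hj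
      unfold pvCol
      have h0 : (0 - j + k - 1) / k = 0 := by rcases hk with rfl | rfl <;> omega
      rw [h0]
      simp
  | succ n ih =>
      have hcast : ((n : Int) + 1) = ((n + 1 : Nat) : Int) := by push_cast; ring
      rw [← hcast, PySem.List.pyRange_one_succ_right (by exact_mod_cast Nat.zero_le n),
        List.foldl_append, ih]
      simp only [List.foldl_cons, List.foldl_nil, PySem.Int.mod_natCast,
        PySem.List.pySetD_natCast, PySem.List.pyGetD_natCast]
      have hmod : n % k < k := Nat.mod_lt _ (by omega)
      have hgetD : ((List.range k).map (fun j => pvCol xs k j n)).getD (n % k) []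
          = pvCol xs k (n % k) n := by
        rw [List.getD_eq_getElem _ _ (by simpa using hmod)]
        simp
      rw [hgetD, pv_set_map_range]
      apply List.map_congr_left
      intro j hj
      rw [List.mem_range] at hj
      by_cases h : j = n % k
      · rw [if_pos h, h]
        unfold pvCol
        have hc : (n + 1 - n % k + k - 1) / k = (n - n % k + k - 1) / k + 1 := by
          rcases hk with rfl | rfl <;> omega
        have hidx : n % k + k * ((n - n % k + k - 1) / k) = n := by
          rcases hk with rfl | rfl <;> omega
        rw [hc, List.range_succ, List.map_append]
        simp [hidx]
      · rw [if_neg h]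
        unfold pvCol
        have he : (n + 1 - j + k - 1) / k = (n - j + k - 1) / k := by
          rcases hk with rfl | rfl <;> omega
        rw [he]

theorem pv_filterMap_range_eq_map {a : Type} (c : Nat) (f : Nat -> Option a) (g : Nat -> a)
    (h : ∀ m < c, f m = some (g m)) :
    List.filterMap f (List.range c) = (List.range c).map g := by
  induction c with
  | zero => simp
  | succ c ih =>
      rw [List.range_succ, List.filterMap_append, List.map_append,
        ih (fun m hm => h m (by omega))]
      simp [h c (by omega)]

-- B's strided slice is the pvCol column over the whole list
theorem pv_slice_eq_col (xs : List String) (k : Nat) (hk : k = 2 ∨ k = 3)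
    (j : Nat) (hj : j < k) :
    (PySem.List.slice? xs (some (j : Int)) none (k : Int)).getD []
      = pvCol xs k j xs.length := by
  have hk0 : (0 : Int) < (k : Int) := by rcases hk with rfl | rfl <;> norm_num
  unfold PySem.List.slice? PySem.List.sliceIndices
  have hstep0 : ¬ ((k : Int) = 0) := by omega
  have hneg : ¬ ((k : Int) < 0) := by omega
  have hjneg : ¬ ((j : Int) < 0) := by omega
  simp only [if_neg hstep0, if_neg hneg, if_neg hjneg, if_pos hk0]
  set L := xs.length with hL
  by_cases hjL : j < L
  · have hmin : min (j : Int) (L : Int) = (j : Int) := by omega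
    have hlt : (j : Int) < (L : Int) := by exact_mod_cast hjL
    simp only [hmin, if_pos hlt]
    have hcnt : (((L : Int) - (j : Int) + (k : Int) - 1) / (k : Int)).toNat
        = (L - j + k - 1) / k := by
      have h1 : ((L : Int) - (j : Int) + (k : Int) - 1) = ((L - j + k - 1 : Nat) : Int) := by
        omega
      rw [h1, ← Int.natCast_div]
      exact Int.toNat_natCast _
    rw [hcnt, Option.getD_some]
    unfold pvCol
    apply pv_filterMap_range_eq_map
    intro m hm
    have hidx : ((j : Int) + (k : Int) * (m : Int)).toNat = j + k * m := by
      omega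
    have hin : j + k * m < L := by rcases hk with rfl | rfl <;> omega
    rw [hidx, List.getElem?_eq_getElem (by omega), List.getD_eq_getElem _ _ (by omega)]
  · have hmin : min (j : Int) (L : Int) = (L : Int) := by omega
    have hlt : ¬ ((L : Int) < (L : Int)) := by omega
    simp only [hmin, if_neg hlt]
    unfold pvCol
    have h0 : (L - j + k - 1) / k = 0 := by rcases hk with rfl | rfl <;> omega
    rw [h0, Option.getD_some]
    simp

-- ===== VERDICT (by name: the statement is the Claim_ definition above) =====
theorem display_get_imageresponsive_spec : Claim_equal_display_get_imageresponsive := by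
  intro xs _
  unfold Spec_display_get_imageresponsive display_get_imageresponsive display_get_imageresponsive_alt
  by_cases h : (xs.length : Int) < 6
  · simp only [if_pos h, Prod.mk.injEq]
    refine ⟨?_, trivial⟩
    have hloop := pv_loop_eq_cols xs 2 (Or.inl rfl) xs.length
    simp only [Nat.cast_ofNat] at hloop
    rw [show (PySem.List.pyRange 0 (2 : Int) 1).map (fun _ => ([] : List String))
        = (List.range 2).map (fun _ => ([] : List String)) from rfl]
    rw [hloop]
    have hs0 := pv_slice_eq_col xs 2 (Or.inl rfl) 0 (by norm_num)
    have hs1 := pv_slice_eq_col xs 2 (Or.inl rfl) 1 (by norm_num)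
    simp only [Nat.cast_ofNat, Nat.cast_zero, Nat.cast_one] at hs0 hs1
    show [pvCol xs 2 0 xs.length, pvCol xs 2 1 xs.length]
        = [(PySem.List.slice? xs (some 0) none 2).getD [],
           (PySem.List.slice? xs (some 1) none 2).getD []]
    rw [hs0, hs1]
  · simp only [if_neg h, Prod.mk.injEq]
    refine ⟨?_, trivial⟩
    have hloop := pv_loop_eq_cols xs 3 (Or.inr rfl) xs.length
    simp only [Nat.cast_ofNat] at hloop
    rw [show (PySem.List.pyRange 0 (3 : Int) 1).map (fun _ => ([] : List String))
        = (List.range 3).map (fun _ => ([] : List String)) from rfl]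
    rw [hloop]
    have hs0 := pv_slice_eq_col xs 3 (Or.inr rfl) 0 (by norm_num)
    have hs1 := pv_slice_eq_col xs 3 (Or.inr rfl) 1 (by norm_num)
    have hs2 := pv_slice_eq_col xs 3 (Or.inr rfl) 2 (by norm_num)
    simp only [Nat.cast_ofNat, Nat.cast_zero, Nat.cast_one] at hs0 hs1 hs2
    show [pvCol xs 3 0 xs.length, pvCol xs 3 1 xs.length, pvCol xs 3 2 xs.length]
        = [(PySem.List.slice? xs (some 0) none 3).getD [],
           (PySem.List.slice? xs (some 1) none 3).getD [],
           (PySem.List.slice? xs (some 2) none 3).getD []]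
    rw [hs0, hs1, hs2]
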